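-- pv_equiv track=rewrite | github.com/Metilamessa/Metilamessa-a2sv | week1/find-three-consecutive-integers-that-sum-to-a-given-number.py | sumOfThree
-- ===== SOURCE A (Python) =====
-- from typing import List
--
-- def sumOfThree(num: int) -> List[int]:
--
--     max_middle = num // 3
--     for middle in range(max_middle - 1, max_middle + 2):
--         start = middle - 1
--         end = middle + 1
--         if start + middle + end == num:
--             return [start, middle, end]
--     return []
-- ===== SOURCE B (Python) =====
-- def sumOfThree(num: int):
--     # closed form: three consecutive ints sum to num iff 3 | num
--     if num % 3 == 0:
--         q = num // 3
--         return [q - 1, q, q + 1]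
--     return []
-- ===== Notes on version B (the rewrite author's own statement) =====
-- stated objective: simpler
-- what changed: Replaces the three-candidate loop around num//3 with a single divisibility test and the closed form [num//3 - 1, num//3, num//3 + 1].
import Mathlib
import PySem

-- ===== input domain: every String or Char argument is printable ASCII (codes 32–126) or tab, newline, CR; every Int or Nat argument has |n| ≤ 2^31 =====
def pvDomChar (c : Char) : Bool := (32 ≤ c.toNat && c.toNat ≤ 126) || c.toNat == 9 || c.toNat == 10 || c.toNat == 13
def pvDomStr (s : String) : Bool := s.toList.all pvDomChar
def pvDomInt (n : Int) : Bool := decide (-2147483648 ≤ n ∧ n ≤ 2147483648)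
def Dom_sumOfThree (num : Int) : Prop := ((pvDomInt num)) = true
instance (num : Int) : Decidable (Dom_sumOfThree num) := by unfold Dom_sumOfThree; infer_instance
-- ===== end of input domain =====

-- B replaces A's three-candidate scan around num//3 by a single divisibility
-- test with the closed form; objective: simpler.

-- ===== PORT A =====
-- the for-loop with early return, recursing over the range list
def sumOfThreeLoop (num : Int) : List Int → List Int
  | [] => []
  | middle :: rest =>
      if (middle - 1) + middle + (middle + 1) = num then [middle - 1, middle, middle + 1]
      else sumOfThreeLoop num rest

def sumOfThree (num : Int) : List Int :=
  let max_middle := PySem.Int.floordiv num 3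
  sumOfThreeLoop num (PySem.List.pyRange (max_middle - 1) (max_middle + 2) 1)

-- ===== PORT B =====
def sumOfThree_alt (num : Int) : List Int :=
  if PySem.Int.mod num 3 = 0 then
    let q := PySem.Int.floordiv num 3
    [q - 1, q, q + 1]
  else []

-- ===== PRECONDITION & SPEC =====
def Spec_sumOfThree (num : Int) (out : List Int) : Prop := out = sumOfThree_alt num
instance (num : Int) (out : List Int) : Decidable (Spec_sumOfThree num out) := by unfold Spec_sumOfThree; infer_instance

-- ===== CLAIM (what is proved, stated in full; the proofs are below) =====
def Claim_equal_sumOfThree : Prop := ∀ (num : Int), Dom_sumOfThree num → Spec_sumOfThree num (sumOfThree num)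

-- ===== LEMMAS AND PROOFS =====

-- ===== VERDICT (by name: the statement is the Claim_ definition above) =====
theorem sumOfThree_spec : Claim_equal_sumOfThree := by
  intro num _
  unfold Spec_sumOfThree sumOfThree sumOfThree_alt
  set q := PySem.Int.floordiv num 3 with hq
  have hrange : PySem.List.pyRange (q - 1) (q + 2) 1 = [q - 1, q, q + 1] := by
    rw [PySem.List.pyRange_one_cons (by omega), PySem.List.pyRange_one_cons (by omega),
        PySem.List.pyRange_one_cons (by omega), PySem.List.pyRange_one_eq_nil (by omega)]
    norm_num
  have hdm : q * 3 + PySem.Int.mod num 3 = num := PySem.Int.floordiv_mul_add_mod num 3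
  have h0 : 0 ≤ PySem.Int.mod num 3 := PySem.Int.mod_nonneg num (by norm_num)
  have h3 : PySem.Int.mod num 3 < 3 := PySem.Int.mod_lt num (by norm_num)
  simp only [hrange, sumOfThreeLoop]
  split_ifs with h1 h2 h3' h4 <;> first
    | rfl
    | (exfalso; omega)
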